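-- pv_equiv track=rewrite | github.com/Cryst67/KattisSolutions | src/problems/shortlex/solutions/shortlex_1.py | get_shortlex_number
-- ===== SOURCE A (Python) =====
-- def get_shortlex_number(n):
--     alphabet = ["0", "1"]
--     shortlex = ""
--     while n > 0:
--         index = (n - 1) % 2
--         shortlex = alphabet[index] + shortlex
--         n = (n - 1) // 2
--     return shortlex
-- ===== SOURCE B (Python) =====
-- def get_shortlex_number(n):
--     if n < 1:
--         return ""
--     return bin(n + 1)[3:]
-- ===== Notes on version B (the rewrite author's own statement) =====
-- stated objective: idiomatic
-- what changed: Replaces the digit-by-digit bijective-base-2 while loop with the closed form bin(n+1)[3:] (binary of n+1 with its leading bit removed); for non-positive inputs it returns the empty string, as A does.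
import Mathlib
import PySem

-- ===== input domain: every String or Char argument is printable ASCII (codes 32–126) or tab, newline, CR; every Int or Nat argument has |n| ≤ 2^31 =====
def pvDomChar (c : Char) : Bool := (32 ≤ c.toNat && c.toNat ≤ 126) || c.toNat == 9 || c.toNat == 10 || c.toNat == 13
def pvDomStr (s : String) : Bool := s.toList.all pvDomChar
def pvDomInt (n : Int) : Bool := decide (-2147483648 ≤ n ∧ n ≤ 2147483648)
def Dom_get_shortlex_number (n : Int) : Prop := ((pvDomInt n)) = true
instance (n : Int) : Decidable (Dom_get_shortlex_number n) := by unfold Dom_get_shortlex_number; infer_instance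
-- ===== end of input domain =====

-- B replaces A's digit-by-digit bijective-base-2 loop with the closed form bin(n+1) minus its
-- leading bit; equivalence of return values is proved for all ints (both are total).

-- ===== PORT A =====
-- termination helper for the while loop (cited by the port's decreasing_by)
theorem pvShortlexDec (n : Int) (h : 0 < n) :
    (PySem.Int.floordiv (n - 1) 2).toNat < n.toNat := by
  rw [PySem.Int.floordiv_eq_ediv_of_pos (by omega)]
  omega

-- while n > 0: index = (n-1) % 2; shortlex = alphabet[index] + shortlex; n = (n-1) // 2
-- (alphabet = ["0","1"]; alphabet[index] with index ∈ {0,1} is written as the if below)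
def shortlexLoop (n : Int) (shortlex : String) : String :=
  if h : 0 < n then
    shortlexLoop (PySem.Int.floordiv (n - 1) 2)
      ((if PySem.Int.mod (n - 1) 2 = 0 then "0" else "1") ++ shortlex)
  else shortlex
termination_by n.toNat
decreasing_by exact pvShortlexDec n h

def get_shortlex_number (n : Int) : String := shortlexLoop n ""

-- ===== PORT B =====
-- binNat m = the binary digit string of m (empty for 0), i.e. bin(m) without the "0b" prefix
def binNat (m : Nat) : List Char :=
  if m = 0 then []
  else binNat (m / 2) ++ [if m % 2 = 0 then '0' else '1']

-- bin(n+1)[3:] = drop the "0b" prefix and the leading '1' digit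
def get_shortlex_number_alt (n : Int) : String :=
  if n < 1 then "" else String.ofList ((binNat (n + 1).toNat).drop 1)

-- ===== PRECONDITION & SPEC =====
def Spec_get_shortlex_number (n : Int) (out : String) : Prop := out = get_shortlex_number_alt n
instance (n : Int) (out : String) : Decidable (Spec_get_shortlex_number n out) := by unfold Spec_get_shortlex_number; infer_instance

-- ===== CLAIM (what is proved, stated in full; the proofs are below) =====
def Claim_equal_get_shortlex_number : Prop := ∀ (n : Int), Dom_get_shortlex_number n → Spec_get_shortlex_number n (get_shortlex_number n)

-- ===== LEMMAS AND PROOFS =====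

theorem binNat_ne_nil (m : Nat) (h : m ≠ 0) : binNat m ≠ [] := by
  rw [binNat]
  simp [h]

-- the loop invariant: A's loop on k produces binary(k+1) without its top bit, prepended to acc
theorem shortlexLoop_eq (k : Nat) :
    ∀ acc : String, shortlexLoop (k : Int) acc = String.ofList ((binNat (k + 1)).drop 1 ++ acc.toList) := by
  induction k using Nat.strong_induction_on with
  | _ k ih =>
    intro acc
    rcases Nat.eq_zero_or_pos k with hk | hk
    · subst hk
      rw [shortlexLoop, dif_neg (by omega)]
      have h0 : binNat 0 = [] := by rw [binNat]; simp
      have h1 : binNat 1 = ['1'] := by rw [binNat]; norm_num [h0]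
      simp [h1, String.ofList_toList]
    · rw [shortlexLoop]
      have hpos : (0 : Int) < (k : Int) := by exact_mod_cast hk
      rw [dif_pos hpos]
      have hc : ((k : Int) - 1) = ((k - 1 : Nat) : Int) := by omega
      have hdiv : PySem.Int.floordiv ((k : Int) - 1) 2 = (((k - 1) / 2 : Nat) : Int) := by
        rw [hc]; exact_mod_cast PySem.Int.floordiv_natCast (k - 1) 2
      have hmod : PySem.Int.mod ((k : Int) - 1) 2 = (((k - 1) % 2 : Nat) : Int) := by
        rw [hc]; exact_mod_cast PySem.Int.mod_natCast (k - 1) 2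
      rw [hdiv, hmod]
      have hlt : (k - 1) / 2 < k := by omega
      rw [ih _ hlt]
      -- binNat (k+1) = binNat ((k-1)/2 + 1) ++ [digit], since (k+1)/2 = (k-1)/2+1 and parity matches
      have hstep : binNat (k + 1)
          = binNat ((k - 1) / 2 + 1) ++ [if (k - 1) % 2 = 0 then '0' else '1'] := by
        conv_lhs => rw [binNat]
        have h2 : (k + 1) / 2 = (k - 1) / 2 + 1 := by omega
        have h3 : (k + 1) % 2 = (k - 1) % 2 := by omega
        simp [h2, h3]
      rw [hstep]
      have hne : binNat ((k - 1) / 2 + 1) ≠ [] := binNat_ne_nil _ (by omega)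
      rcases List.exists_cons_of_ne_nil hne with ⟨c, cs, hcs⟩
      rw [hcs]
      rcases Nat.even_or_odd (k - 1) with he | ho
      · have : (k - 1) % 2 = 0 := Nat.even_iff.mp he
        simp [this, String.ofList, List.drop]
      · have : (k - 1) % 2 = 1 := Nat.odd_iff.mp ho
        simp [this, String.ofList, List.drop]

-- ===== VERDICT (by name: the statement is the Claim_ definition above) =====
theorem get_shortlex_number_spec : Claim_equal_get_shortlex_number := by
  intro n _
  unfold Spec_get_shortlex_number get_shortlex_number get_shortlex_number_alt
  by_cases hn : n < 1
  · rw [if_pos hn, shortlexLoop, dif_neg (by omega)]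
  · rw [if_neg hn]
    obtain ⟨k, hk⟩ : ∃ k : Nat, n = (k : Int) := ⟨n.toNat, by omega⟩
    subst hk
    rw [shortlexLoop_eq]
    have h1 : ((k : Int) + 1).toNat = k + 1 := by omega
    rw [h1]
    simp [String.ofList]
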